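-- pv_equiv track=rewrite | github.com/thiadeliria/KenKen | kenken_csp.py | check_div
-- ===== SOURCE A (Python) =====
-- import itertools
--
-- def check_div(vals, target):
--     '''
--     Returns True iff values in vals can be divided
--     to give quotient target.
--     '''
--     for perm in itertools.permutations(vals):
--         quotient = perm[0]
--         i = 1
--         while(i < len(vals)):
--             quotient //= perm[i]
--             i += 1
--         if quotient == target:
--             return True
--     return False
-- ===== SOURCE B (Python) =====
-- def check_div(vals, target):
--     '''
--     Returns True iff values in vals can be divided
--     to give quotient target.
--     '''
--     # Layered search over deduplicated states (quotient, sorted remaining values)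
--     # instead of enumerating all n! permutations; divisions by zero are never
--     # attempted (such orderings cannot yield a quotient anyway).
--     states = {(a, tuple(sorted(vals[:i] + vals[i + 1:])))
--               for i, a in enumerate(vals)}
--     for _ in range(len(vals) - 1):
--         states = {(q // rest[j], rest[:j] + rest[j + 1:])
--                   for q, rest in states
--                   for j in range(len(rest)) if rest[j] != 0}
--     return any(q == target for q, _ in states)
-- ===== Notes on version B (the rewrite author's own statement) =====
-- stated objective: alternative
-- what changed: Replaces the enumeration of all n! permutations by a layered breadth-first search over deduplicated states (current quotient, sorted tuple of remaining values), skipping zero divisors (such orderings raise in A, which is outside Pre_); equal intermediate states are explored once, but the state set can itself grow combinatorially, so no speed is claimed.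
import Mathlib
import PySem

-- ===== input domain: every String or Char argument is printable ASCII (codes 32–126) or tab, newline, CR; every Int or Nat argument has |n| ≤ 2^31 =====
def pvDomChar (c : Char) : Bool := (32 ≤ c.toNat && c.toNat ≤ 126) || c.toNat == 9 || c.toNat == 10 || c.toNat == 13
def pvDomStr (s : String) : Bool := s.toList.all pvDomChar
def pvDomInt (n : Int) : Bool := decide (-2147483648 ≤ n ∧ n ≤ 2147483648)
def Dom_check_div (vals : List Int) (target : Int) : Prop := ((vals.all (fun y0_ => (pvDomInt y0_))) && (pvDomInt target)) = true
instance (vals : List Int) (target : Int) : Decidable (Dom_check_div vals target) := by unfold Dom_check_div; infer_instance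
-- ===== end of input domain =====

-- B replaces A's enumeration of all n! permutations by a layered search over deduplicated
-- (quotient, sorted remaining values) states that never divides by zero; return-value
-- equivalence on Pre_ (exactly the inputs where A returns) is proved below.

-- ===== PORT A =====
-- for perm in itertools.permutations(vals): fold '//' over the permutation, compare to target
def check_div (vals : List Int) (target : Int) : Bool :=
  (PySem.List.permutations vals vals.length).any fun perm =>
    match perm with
    | [] => false   -- perm[0] raises IndexError in Python (only when vals = [], outside Pre_)
    | q0 :: rest => decide (rest.foldl PySem.Int.floordiv q0 = target)

-- ===== PORT B =====
-- rest[:j] + rest[j+1:]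
def pvRemoveAt (l : List Int) (j : Nat) : List Int := l.take j ++ l.drop (j + 1)

-- {(a, tuple(sorted(vals[:i] + vals[i+1:]))) for i, a in enumerate(vals)}
def pvInit (vals : List Int) : PySem.Set (Int × List Int) :=
  PySem.Set.ofList ((List.range vals.length).map fun i =>
    (vals.getD i 0, PySem.List.sorted (pvRemoveAt vals i) (fun x => x)))

-- {(q // rest[j], rest[:j] + rest[j+1:]) for q, rest in states for j in range(len(rest)) if rest[j] != 0}
def pvStep (states : PySem.Set (Int × List Int)) : PySem.Set (Int × List Int) :=
  PySem.Set.ofList (states.flatMap fun p =>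
    (((List.range p.2.length).filter fun j => p.2.getD j 0 != 0).map fun j =>
      (PySem.Int.floordiv p.1 (p.2.getD j 0), pvRemoveAt p.2 j)))

def check_div_alt (vals : List Int) (target : Int) : Bool :=
  ((List.range (vals.length - 1)).foldl (fun s _ => pvStep s) (pvInit vals)).any
    fun p => decide (p.1 = target)

-- ===== PRECONDITION & SPEC =====
-- Pre_ is exactly the inputs on which A returns: it excludes the empty list (A raises
-- IndexError) and lists of length >= 2 containing 0 — where A raises ZeroDivisionError —
-- except when the unique zero is the first element and target is 0 (there A returns True).
def Pre_check_div (vals : List Int) (target : Int) : Prop :=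
  vals ≠ [] ∧ (vals.length = 1 ∨ ¬ (0 ∈ vals) ∨
    (vals.head? = some 0 ∧ vals.count 0 = 1 ∧ target = 0))
instance (vals : List Int) (target : Int) : Decidable (Pre_check_div vals target) := by
  unfold Pre_check_div; infer_instance
def pvWitness_check_div : List Int × Int := ([6, 2], 3)

def Spec_check_div (vals : List Int) (target : Int) (out : Bool) : Prop :=
  out = check_div_alt vals target
instance (vals : List Int) (target : Int) (out : Bool) : Decidable (Spec_check_div vals target out) := by
  unfold Spec_check_div; infer_instance

-- ===== CLAIM (what is proved, stated in full; the proofs are below) =====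
def Claim_equal_check_div : Prop := ∀ (vals : List Int) (target : Int),
  Dom_check_div vals target → Pre_check_div vals target →
  Spec_check_div vals target (check_div vals target)

-- ===== LEMMAS AND PROOFS =====

def pvFoldQ (a : Int) (r : List Int) : Int := r.foldl PySem.Int.floordiv a

-- invariant for B's layer k: states are exactly the (quotient, sorted remaining) pairs
-- reachable by k picks whose divisors are all nonzero
def pvGood (vals : List Int) (k : Nat) (p : Int × List Int) : Prop :=
  ∃ a r, r.length + 1 = k ∧ ((a :: r) ++ p.2).Perm vals ∧
    p.2.Pairwise (· ≤ ·) ∧ (∀ x ∈ r, x ≠ 0) ∧ p.1 = pvFoldQ a r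

lemma pv_perms_succ (xs : List Int) (r : Nat) :
    PySem.List.permutations xs (r + 1) =
      (List.range xs.length).flatMap (fun i =>
        match xs[i]? with
        | none => []
        | some a => (PySem.List.permutations (xs.eraseIdx i) r).map (a :: ·)) := by
  rw [PySem.List.permutations]
  congr 1
  funext i
  cases hx : xs[i]? <;> simp

lemma pvRemoveAt_eq_eraseIdx (l : List Int) (j : Nat) : pvRemoveAt l j = l.eraseIdx j := by
  simp [pvRemoveAt, List.eraseIdx_eq_take_drop_succ]

lemma pv_perm_cons_eraseIdx (xs : List Int) (i : Nat) (hi : i < xs.length) :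
    xs.Perm (xs[i] :: xs.eraseIdx i) := by
  have h1 : xs = xs.take i ++ xs[i] :: xs.drop (i + 1) := by
    conv_lhs => rw [← List.take_append_drop i xs]
    congr 1
    exact (List.getElem_cons_drop hi).symm
  rw [List.eraseIdx_eq_take_drop_succ]
  conv_lhs => rw [h1]
  exact List.perm_middle

lemma pv_mem_permutations (c : List Int) : ∀ (xs : List Int), c.Perm xs →
    c ∈ PySem.List.permutations xs xs.length := by
  induction c with
  | nil =>
    intro xs h
    have hx : xs = [] := h.symm.eq_nil
    subst hx
    simp [PySem.List.permutations_zero]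
  | cons a r ih =>
    intro xs h
    have ha : a ∈ xs := h.subset (List.mem_cons_self ..)
    obtain ⟨i, hi, hgi⟩ := List.mem_iff_getElem.mp ha
    have hx : xs.Perm (a :: xs.eraseIdx i) := by
      have := pv_perm_cons_eraseIdx xs i hi
      rwa [hgi] at this
    have hr : r.Perm (xs.eraseIdx i) := (h.trans hx).cons_inv
    have hlen : xs.length = r.length + 1 := by
      have := h.length_eq
      simpa using this.symm
    have hlen2 : (xs.eraseIdx i).length = r.length := by
      rw [List.length_eraseIdx]
      simp only [hi, if_pos]
      omega
    have hmem := ih (xs.eraseIdx i) hr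
    rw [hlen2] at hmem
    rw [hlen, pv_perms_succ]
    refine List.mem_flatMap.mpr ⟨i, List.mem_range.mpr hi, ?_⟩
    rw [List.getElem?_eq_getElem hi, hgi]
    exact List.mem_map.mpr ⟨r, hmem, rfl⟩

lemma pv_A_iff (vals : List Int) (target : Int) :
    check_div vals target = true ↔
      ∃ a r, ((a :: r) : List Int).Perm vals ∧ pvFoldQ a r = target := by
  unfold check_div
  rw [List.any_eq_true]
  constructor
  · rintro ⟨perm, hmem, hf⟩
    have hp := PySem.List.perm_of_mem_permutations hmem
    cases perm with
    | nil => simp at hf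
    | cons a r =>
      refine ⟨a, r, hp, ?_⟩
      simpa [pvFoldQ] using hf
  · rintro ⟨a, r, hp, hq⟩
    refine ⟨a :: r, pv_mem_permutations (a :: r) vals hp, ?_⟩
    simpa [pvFoldQ] using hq

lemma pv_init_mem (vals : List Int) (p : Int × List Int) :
    p ∈ pvInit vals ↔ pvGood vals 1 p := by
  unfold pvInit
  rw [PySem.Set.mem_ofList, List.mem_map]
  constructor
  · rintro ⟨i, hir, rfl⟩
    have hi : i < vals.length := List.mem_range.mp hir
    refine ⟨vals[i], [], rfl, ?_, ?_, by simp, List.getD_eq_getElem vals 0 hi⟩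
    · have h1 : (PySem.List.sorted (pvRemoveAt vals i) (fun x => x)).Perm (vals.eraseIdx i) := by
        rw [← pvRemoveAt_eq_eraseIdx]
        exact PySem.List.sorted_perm ..
      have h2 := (pv_perm_cons_eraseIdx vals i hi).symm
      simp only [List.cons_append, List.nil_append]
      exact (h1.cons vals[i]).trans h2
    · simpa using PySem.List.sorted_pairwise (pvRemoveAt vals i) (fun x => x)
  · rintro ⟨a, r, hlen, hperm, hpw, _, hq⟩
    have hr : r = [] := by
      cases r with
      | nil => rfl
      | cons x xs => simp at hlen
    subst hr
    have hperm' : (a :: p.2).Perm vals := by simpa using hperm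
    have ha : a ∈ vals := hperm'.subset (List.mem_cons_self ..)
    obtain ⟨i, hi, hgi⟩ := List.mem_iff_getElem.mp ha
    have hx : vals.Perm (a :: vals.eraseIdx i) := by
      have := pv_perm_cons_eraseIdx vals i hi
      rwa [hgi] at this
    have hp2 : p.2.Perm (vals.eraseIdx i) := (hperm'.trans hx).cons_inv
    have hsort : PySem.List.sorted (vals.eraseIdx i) (fun x => x) = p.2 :=
      PySem.List.sorted_id_eq_of_perm_of_pairwise _ _ hp2 hpw
    refine ⟨i, List.mem_range.mpr hi, ?_⟩
    have h1 : vals.getD i 0 = p.1 := by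
      rw [List.getD_eq_getElem vals 0 hi, hgi, hq]; rfl
    have h2 : PySem.List.sorted (pvRemoveAt vals i) (fun x => x) = p.2 := by
      rw [pvRemoveAt_eq_eraseIdx]; exact hsort
    rw [h1, h2]

lemma pv_step_mem (vals : List Int) (k : Nat) (hk : 1 ≤ k) (s : PySem.Set (Int × List Int))
    (hs : ∀ p, p ∈ s ↔ pvGood vals k p) (p' : Int × List Int) :
    p' ∈ pvStep s ↔ pvGood vals (k + 1) p' := by
  unfold pvStep
  rw [PySem.Set.mem_ofList, List.mem_flatMap]
  constructor
  · rintro ⟨p, hp, hmem⟩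
    obtain ⟨j, hjf, rfl⟩ := List.mem_map.mp hmem
    obtain ⟨hjr, hjnz⟩ := List.mem_filter.mp hjf
    have hj : j < p.2.length := List.mem_range.mp hjr
    have hjnz' : p.2.getD j 0 ≠ 0 := by simpa using hjnz
    obtain ⟨a, r, hlen, hperm, hpw, hnz, hq⟩ := (hs p).mp hp
    have hd : p.2.getD j 0 = p.2[j] := List.getD_eq_getElem p.2 0 hj
    refine ⟨a, r ++ [p.2.getD j 0], by simp [hlen], ?_, ?_, ?_, ?_⟩
    · have h2 : p.2.Perm (p.2[j] :: p.2.eraseIdx j) := pv_perm_cons_eraseIdx p.2 j hj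
      have h3 : ((a :: (r ++ [p.2.getD j 0])) ++ pvRemoveAt p.2 j).Perm ((a :: r) ++ p.2) := by
        rw [pvRemoveAt_eq_eraseIdx, hd]
        have : (a :: (r ++ [p.2[j]])) ++ p.2.eraseIdx j
            = (a :: r) ++ (p.2[j] :: p.2.eraseIdx j) := by simp
        rw [this]
        exact (h2.symm).append_left (a :: r)
      exact h3.trans hperm
    · rw [pvRemoveAt_eq_eraseIdx]
      exact List.Pairwise.sublist (List.eraseIdx_sublist p.2 j) hpw
    · intro x hx
      rcases List.mem_append.mp hx with h | h
      · exact hnz x h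
      · rw [List.mem_singleton.mp h]; exact hjnz'
    · rw [hq]
      simp [pvFoldQ, List.foldl_append]
  · rintro ⟨a, r', hlen, hperm, hpw, hnz, hq⟩
    obtain hcase | ⟨r, d, rfl⟩ := r'.eq_nil_or_concat
    · subst hcase; simp at hlen; omega
      -- (hk rules out k = 0)
    rw [List.concat_eq_append] at *
    have hdnz : d ≠ 0 := hnz d (by simp)
    have hnz' : ∀ x ∈ r, x ≠ 0 := fun x hx => hnz x (by simp [hx])
    set t := PySem.List.sorted (d :: p'.2) (fun x => x) with ht
    have htperm : t.Perm (d :: p'.2) := PySem.List.sorted_perm ..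
    have htpw : t.Pairwise (· ≤ ·) := by
      simpa using PySem.List.sorted_pairwise (d :: p'.2) (fun x => x)
    have hgood : pvGood vals k (pvFoldQ a r, t) := by
      refine ⟨a, r, by simp at hlen; omega, ?_, htpw, hnz', rfl⟩
      have h1 : ((a :: r) ++ t).Perm ((a :: r) ++ (d :: p'.2)) := htperm.append_left _
      have h2 : (a :: r) ++ (d :: p'.2) = (a :: (r ++ [d])) ++ p'.2 := by simp
      exact h1.trans (h2 ▸ hperm)
    have hpmem : (pvFoldQ a r, t) ∈ s := (hs _).mpr hgood
    have hd : d ∈ t := (PySem.List.mem_sorted ..).mpr (List.mem_cons_self ..)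
    obtain ⟨j, hj, hgj⟩ := List.mem_iff_getElem.mp hd
    have hdj : t.getD j 0 = d := by rw [List.getD_eq_getElem t 0 hj, hgj]
    refine ⟨(pvFoldQ a r, t), hpmem,
      List.mem_map.mpr ⟨j, List.mem_filter.mpr ⟨List.mem_range.mpr hj, by
        simp only [List.getD] at hdj
        simp [hdj, hdnz]⟩, ?_⟩⟩
    have htj : t.Perm (d :: t.eraseIdx j) := by
      have := pv_perm_cons_eraseIdx t j hj
      rwa [hgj] at this
    have he : (t.eraseIdx j).Perm p'.2 := (htj.symm.trans htperm).cons_inv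
    have hepw : (t.eraseIdx j).Pairwise (· ≤ ·) := List.Pairwise.sublist (List.eraseIdx_sublist t j) htpw
    have he2 : t.eraseIdx j = p'.2 := by
      have u1 : PySem.List.sorted p'.2 (fun x => x) = t.eraseIdx j :=
        PySem.List.sorted_id_eq_of_perm_of_pairwise _ _ he hepw
      have u2 : PySem.List.sorted p'.2 (fun x => x) = p'.2 :=
        PySem.List.sorted_id_eq_of_perm_of_pairwise _ _ (List.Perm.refl _) hpw
      rw [← u1, u2]
    have hv : PySem.Int.floordiv (pvFoldQ a r) (t.getD j 0) = p'.1 := by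
      rw [hdj, hq]
      simp [pvFoldQ, List.foldl_append]
    rw [pvRemoveAt_eq_eraseIdx, he2, hv]

lemma pv_iter_mem (vals : List Int) (m : Nat) (p : Int × List Int) :
    p ∈ (List.range m).foldl (fun s _ => pvStep s) (pvInit vals) ↔ pvGood vals (m + 1) p := by
  induction m generalizing p with
  | zero => simpa using pv_init_mem vals p
  | succ n ih =>
    rw [List.range_succ, List.foldl_append]
    simp only [List.foldl_cons, List.foldl_nil]
    exact pv_step_mem vals (n + 1) (by omega) _ (fun q => ih q) p

lemma pv_B_iff (vals : List Int) (target : Int) (hne : vals ≠ []) :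
    check_div_alt vals target = true ↔
      ∃ a r, ((a :: r) : List Int).Perm vals ∧ (∀ x ∈ r, x ≠ 0) ∧ pvFoldQ a r = target := by
  unfold check_div_alt
  rw [List.any_eq_true]
  constructor
  · rintro ⟨p, hp, ht⟩
    obtain ⟨a, r, hlen, hperm, hpw, hnz, hq⟩ := (pv_iter_mem vals (vals.length - 1) p).mp hp
    have hn : 1 ≤ vals.length := by
      cases vals with
      | nil => exact absurd rfl hne
      | cons x xs => simp
    have hlen' : (vals.length - 1) + 1 = vals.length := by omega
    rw [hlen'] at hlen
    have hp2 : p.2 = [] := by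
      have := hperm.length_eq
      simp at this
      have : p.2.length = 0 := by omega
      exact List.length_eq_zero_iff.mp this
    rw [hp2] at hperm
    refine ⟨a, r, by simpa using hperm, hnz, ?_⟩
    rw [← hq]
    exact of_decide_eq_true ht
  · rintro ⟨a, r, hperm, hnz, hq⟩
    refine ⟨(target, []), ?_, by simp⟩
    rw [pv_iter_mem]
    have hlen : r.length + 1 = vals.length := by simpa using hperm.length_eq
    exact ⟨a, r, by omega, by simpa using hperm, by simp, hnz, hq.symm⟩

lemma pv_floordiv_zero_left (x : Int) : PySem.Int.floordiv 0 x = 0 := by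
  simp [PySem.Int.floordiv]

lemma pv_fold_zero : ∀ r : List Int, pvFoldQ 0 r = 0
  | [] => rfl
  | x :: t => by
    rw [pvFoldQ, List.foldl_cons, pv_floordiv_zero_left]
    exact pv_fold_zero t

-- ===== VERDICT (by name: the statement is the Claim_ definition above) =====
theorem check_div_spec : Claim_equal_check_div := by
  intro vals target _ hpre
  unfold Spec_check_div
  obtain ⟨hne, hcase⟩ := hpre
  have hiff : (check_div vals target = true) ↔ (check_div_alt vals target = true) := by
    rw [pv_A_iff, pv_B_iff vals target hne]
    constructor
    · rintro ⟨a, r, hperm, hq⟩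
      rcases hcase with h1 | h0 | ⟨hh, hc, ht⟩
      · -- singleton list: r must be empty
        have : r.length = 0 := by
          have hL := hperm.length_eq
          simp only [List.length_cons] at hL
          omega
        refine ⟨a, r, hperm, ?_, hq⟩
        intro x hx
        rw [List.length_eq_zero_iff.mp this] at hx
        simp at hx
      · -- no zero in vals: all of r is nonzero
        refine ⟨a, r, hperm, ?_, hq⟩
        intro x hx h0'
        subst h0'
        exact h0 (hperm.subset (List.mem_cons_of_mem a hx))
      · -- unique leading zero, target 0: produce the explicit zero-free witness 0 :: tail
        obtain ⟨x, xs, rfl⟩ := List.exists_cons_of_ne_nil hne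
        have hx0 : x = 0 := by simpa using hh
        subst hx0 ht
        refine ⟨0, xs, List.Perm.refl _, ?_, pv_fold_zero xs⟩
        intro y hy h0'
        subst h0'
        have : (1 : Nat) + xs.count 0 = 1 := by simpa [List.count_cons] using hc
        have : xs.count 0 = 0 := by omega
        exact (List.count_eq_zero.mp this) hy
    · rintro ⟨a, r, hperm, _, hq⟩
      exact ⟨a, r, hperm, hq⟩
  cases h1 : check_div vals target <;> cases h2 : check_div_alt vals target <;> simp_all
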